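-- pv_equiv track=rewrite | github.com/osagieomigie/foodWebs | Osa_Omigie-food_webs.py | getProducers
-- ===== SOURCE A (Python) =====
-- def getProducers(animals):
--     producers = [] #list of producers
--     preds = animals.keys() #predators
--
--     for preys in animals.values():
--         for prey in preys: #each animal in preys
--             if prey not in preds and prey not in producers: #prey not a predator and avoids duplicates
--                 producers.append(prey)
--
--     return producers
-- ===== SOURCE B (Python) =====
-- def getProducers(animals):
--     # Worklist-removal algorithm: repeatedly take the first prey from the
--     # remaining worklist, purge all its later duplicates from the worklist,
--     # and emit it unless it is a predator.
--     work = [prey for preys in animals.values() for prey in preys]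
--     producers = []
--     while work:
--         head = work[0]
--         work = [x for x in work[1:] if x != head]
--         if head not in animals:
--             producers.append(head)
--     return producers
-- ===== Notes on version B (the rewrite author's own statement) =====
-- stated objective: alternative
-- what changed: Replaces A's accumulator-membership dedup (check 'prey not in producers' against the growing output inside one interleaved nested pass) by a worklist-removal (nub-style) algorithm: flatten all prey once, then repeatedly pop the first element, purge its duplicates from the remaining worklist, and emit it unless it is a predator key.
import Mathlib
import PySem

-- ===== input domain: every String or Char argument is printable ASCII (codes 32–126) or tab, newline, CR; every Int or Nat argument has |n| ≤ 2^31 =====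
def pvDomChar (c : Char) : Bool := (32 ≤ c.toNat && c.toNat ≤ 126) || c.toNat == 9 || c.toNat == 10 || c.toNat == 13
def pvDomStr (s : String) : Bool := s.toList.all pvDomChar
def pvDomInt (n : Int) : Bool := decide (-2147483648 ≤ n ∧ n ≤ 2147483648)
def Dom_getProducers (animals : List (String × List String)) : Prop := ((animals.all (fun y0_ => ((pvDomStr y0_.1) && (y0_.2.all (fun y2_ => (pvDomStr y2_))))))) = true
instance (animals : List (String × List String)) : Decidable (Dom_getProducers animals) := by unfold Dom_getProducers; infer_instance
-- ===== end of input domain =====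

-- B replaces A's interleaved accumulator-membership dedup by a worklist-removal (nub-style)
-- algorithm: flatten, then repeatedly pop the first prey, purge its duplicates, emit if not a predator.

-- ===== PORT A =====
def getProducers (animals : List (String × List String)) : List String :=
  let preds := animals.map Prod.fst
  animals.foldl
    (fun producers kv =>
      kv.2.foldl
        (fun producers prey =>
          if !preds.contains prey && !producers.contains prey then producers ++ [prey]
          else producers)
        producers)
    []

-- ===== PORT B =====
-- the while loop of Source B: pop first element, purge its duplicates from the worklist,
-- emit it unless it is a predator (isPred = key membership in animals)
-- the fuel argument only makes the shrinking-worklist recursion structural; it is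
-- called with fuel = length of the worklist, which never runs out (pv_work_eq below)
def pvWork (isPred : String → Bool) : Nat → List String → List String
  | _, [] => []
  | 0, _ :: _ => []
  | fuel + 1, h :: t =>
      if isPred h then pvWork isPred fuel (t.filter (fun x => !(x == h)))
      else h :: pvWork isPred fuel (t.filter (fun x => !(x == h)))

def getProducers_alt (animals : List (String × List String)) : List String :=
  let work := animals.flatMap Prod.snd
  pvWork (fun p => (animals.map Prod.fst).contains p) work.length work

-- ===== PRECONDITION & SPEC =====
def Spec_getProducers (animals : List (String × List String)) (out : List String) : Prop := out = getProducers_alt animals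
instance (animals : List (String × List String)) (out : List String) : Decidable (Spec_getProducers animals out) := by unfold Spec_getProducers; infer_instance

-- ===== CLAIM (what is proved, stated in full; the proofs are below) =====
def Claim_equal_getProducers : Prop := ∀ (animals : List (String × List String)), Dom_getProducers animals → Spec_getProducers animals (getProducers animals)

-- ===== LEMMAS AND PROOFS =====

-- A's nested loop over the dict's values is the same fold over the flattened prey list.
theorem pv_foldl_nested_eq_flat (f : List String → String → List String)
    (animals : List (String × List String)) (init : List String) :
    animals.foldl (fun acc kv => kv.2.foldl f acc) init
      = (animals.flatMap Prod.snd).foldl f init := by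
  induction animals generalizing init with
  | nil => rfl
  | cons kv rest ih => simp [List.flatMap_cons, List.foldl_append, ih]

-- One step of A's interleaved loop equals one dedup step followed by the predator filter.
theorem pv_step (pred : String → Bool) (d : List String) (p : String) :
    (if pred p && !(d.filter pred).contains p then d.filter pred ++ [p] else d.filter pred)
      = (PySem.Set.add d p).filter pred := by
  have hfm : p ∈ d.filter pred ↔ p ∈ d ∧ pred p = true := by
    simp [List.mem_filter]
  by_cases hd : p ∈ d
  · by_cases hp : pred p = true
    · have : p ∈ d.filter pred := hfm.mpr ⟨hd, hp⟩
      simp [PySem.Set.add, hd, hp, this]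
    · simp [PySem.Set.add, hd, hp]
  · have hfc : p ∉ d.filter pred := fun h => hd (hfm.mp h).1
    by_cases hp : pred p = true
    · simp [PySem.Set.add, hd, hp, hfc, List.filter_append]
    · simp [PySem.Set.add, hd, hp, hfc, List.filter_append]

-- A's interleaved fold from a filtered accumulator = dedup fold, then filter.
theorem pv_loop (pred : String → Bool) (l : List String) (d : List String) :
    l.foldl (fun acc p => if pred p && !acc.contains p then acc ++ [p] else acc) (d.filter pred)
      = (l.foldl PySem.Set.add d).filter pred := by
  induction l generalizing d with
  | nil => rfl
  | cons p rest ih =>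
    simp only [List.foldl_cons]
    rw [pv_step pred d p]
    exact ih (PySem.Set.add d p)

-- elements already in the accumulator are skipped by the dedup fold
theorem pv_skip_mem (h : String) (l : List String) (d : List String) (hm : h ∈ d) :
    l.foldl PySem.Set.add d = (l.filter (fun x => !(x == h))).foldl PySem.Set.add d := by
  induction l generalizing d with
  | nil => rfl
  | cons x t ih =>
    by_cases hx : x = h
    · subst hx
      have : PySem.Set.add d x = d := by simp [PySem.Set.add, hm]
      simp [this, ih d hm]
    · have hmem : h ∈ PySem.Set.add d x := by
        simp [PySem.Set.add]; split <;> simp [hm]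
      simp [hx, ih (PySem.Set.add d x) hmem]

-- a leading accumulator element factors out when it never occurs in the list
theorem pv_factor (h : String) (l : List String) (d : List String) (hn : h ∉ l) :
    l.foldl PySem.Set.add (h :: d) = h :: l.foldl PySem.Set.add d := by
  induction l generalizing d with
  | nil => rfl
  | cons x t ih =>
    have hxh : x ≠ h := fun e => hn (e ▸ List.mem_cons_self)
    have hnt : h ∉ t := fun m => hn (List.mem_cons_of_mem _ m)
    have h1 : PySem.Set.add (h :: d) x = h :: PySem.Set.add d x := by
      simp [PySem.Set.add, hxh]
      split <;> simp
    simp only [List.foldl_cons, h1, ih _ hnt]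

-- the dedup fold satisfies the nub recursion
theorem pv_dedup_nub (h : String) (t : List String) :
    (h :: t).foldl PySem.Set.add []
      = h :: (t.filter (fun x => !(x == h))).foldl PySem.Set.add [] := by
  have h0 : PySem.Set.add [] h = [h] := by simp [PySem.Set.add]
  have hskip := pv_skip_mem h t [h] (by simp)
  have hnot : h ∉ t.filter (fun x => !(x == h)) := by
    simp [List.mem_filter]
  have hfac := pv_factor h (t.filter (fun x => !(x == h))) [] hnot
  simp only [List.foldl_cons, h0, hskip, hfac]

-- B's worklist recursion computes dedup-then-filter (fuel suffices)
theorem pv_work_eq (isPred : String → Bool) (fuel : Nat) (l : List String)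
    (hf : l.length ≤ fuel) :
    pvWork isPred fuel l = (l.foldl PySem.Set.add []).filter (fun p => !isPred p) := by
  induction fuel generalizing l with
  | zero =>
    have : l = [] := List.eq_nil_of_length_eq_zero (Nat.le_zero.mp hf)
    subst this; rfl
  | succ n ih =>
    cases l with
    | nil => rfl
    | cons h t =>
      have hlen : (t.filter (fun x => !(x == h))).length ≤ n :=
        Nat.le_trans (List.length_filter_le _ _) (Nat.succ_le_succ_iff.mp hf)
      rw [pv_dedup_nub, List.filter_cons, pvWork]
      by_cases hp : isPred h = true <;> simp only [hp] <;> simp [ih _ hlen]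

-- ===== VERDICT (by name: the statement is the Claim_ definition above) =====
theorem getProducers_spec : Claim_equal_getProducers := by
  intro animals _
  unfold Spec_getProducers getProducers getProducers_alt
  rw [pv_foldl_nested_eq_flat]
  have h := pv_loop (fun p => !(animals.map Prod.fst).contains p)
    (animals.flatMap Prod.snd) []
  rw [pv_work_eq _ _ _ (Nat.le_refl _)]
  simpa using h
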